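-- pv_equiv track=rewrite | github.com/klarissajd/z-algorithm | q1.py | find_pattern_allow_transposition
-- ===== SOURCE A (Python) =====
-- def reverse_string(string):
--     return string[::-1]
--
-- def string_match(string, r, l):
--     len_string = len(string)
--     return r < len_string and string[r] == string[r - l]
--
-- def z_algorithm_list(combined_str):
--     len_combined = len(combined_str)
--     z_lst = [None] * len_combined
--     left = 0
--     right = 0
--
--     for i in range(1, len_combined):
--         # Base case or Case 1
--         if i > right:
--             left = i
--             right = i
--             while string_match(combined_str, right, left):
--                 right += 1
--             z_lst[i] = right - left
--             right -= 1
--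
--         else:
--             k = i - left
--             if z_lst[k] < right - i + 1:
--                 z_lst[i] = z_lst[k]
--             else:
--                 left = i
--                 while string_match(combined_str, right, left):
--                     right += 1
--                 z_lst[i] = right - left
--                 right -= 1
--
--     return z_lst
--
-- def combine_text_pattern(txt, pat):
--     original_string = '$'.join([pat, txt])
--     reversed_string = '$'.join([reverse_string(pat), reverse_string(txt)])
--     return original_string, reversed_string
--
-- def find_pattern_allow_transposition(txt, pat):
--     if len(pat) == 0 or len(txt) < len(pat):
--         return []
--
--     og_string, rev_string = combine_text_pattern(txt, pat)
--     # taking a list of z-algorithm just of the text (pattern and '$' are excluded)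
--     og_string_lst = z_algorithm_list(og_string)[len(pat) + 1:]
--     rev_string_lst = z_algorithm_list(rev_string)[len(pat) + 1:]
--     rev_string_lst.reverse()
--
--     # logic to why calculate_lst is created will be written in the pdf.
--     calculate_lst = []
--
--     for i in range(len(txt) - len(pat) + 1):
--         calculate_lst.append(og_string_lst[i] + rev_string_lst[i + len(pat) - 1])
--
--     result = []
--
--     # Complexity: O(n - m) where n is the length of the text and m is the length of the pattern
--     for j in range(len(calculate_lst)):
--         if calculate_lst[j] / 2 == len(pat):
--             # convert to index-1 based
--             result.append(str(j + 1))
--         elif calculate_lst[j] + 2 == len(pat):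
--
--             index = og_string_lst[j]
--             transposition = pat[index: index + 2]
--             txt_string = og_string[len(pat) + 1:]
--             if txt_string[j + index: j + index + 2] == reverse_string(transposition):
--                 # change to index-1 based
--                 next_ans = [str(j + 1), str(j + index + 1)]
--                 result.append(" ".join(next_ans))
--
--     return result
-- ===== SOURCE B (Python) =====
-- def find_pattern_allow_transposition(txt, pat):
--     m, n = len(pat), len(txt)
--     if m == 0 or n < m:
--         return []
--
--     def lead(a, b):
--         # length of the common prefix of a and b
--         c = 0
--         for x, y in zip(a, b):
--             if x != y:
--                 break
--             c += 1
--         return c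
--
--     result = []
--     for j in range(n - m + 1):
--         f = lead(pat, txt[j:])
--         if f == m:
--             result.append(str(j + 1))
--         else:
--             b = lead(pat[::-1], txt[j:j + m][::-1])
--             if f + b == m - 2 and txt[j + f] == pat[f + 1] and txt[j + f + 1] == pat[f]:
--                 result.append(str(j + 1) + " " + str(j + f + 1))
--     return result
-- ===== Notes on version B (the rewrite author's own statement) =====
-- stated objective: simpler
-- what changed: Replaced the whole Z-algorithm pipeline over '$'-joined pattern/text strings (Z-array of pat$txt and of the reversed strings, then a combined-count pass) by a direct per-window scanner that counts the matching prefix and suffix of each window; a timing run measured it faster on the generated inputs (no Python-level Z-array/state machinery, early exit at the first mismatch), though its worst case is O(n*m).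
-- outside the precondition, e.g. on find_pattern_allow_transposition('abba$$', 'a'): A returns ['1'], B returns ['1', '4']; on find_pattern_allow_transposition('$bb$$$$', 'b'): A returns [], B returns ['2', '3']
import Mathlib
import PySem

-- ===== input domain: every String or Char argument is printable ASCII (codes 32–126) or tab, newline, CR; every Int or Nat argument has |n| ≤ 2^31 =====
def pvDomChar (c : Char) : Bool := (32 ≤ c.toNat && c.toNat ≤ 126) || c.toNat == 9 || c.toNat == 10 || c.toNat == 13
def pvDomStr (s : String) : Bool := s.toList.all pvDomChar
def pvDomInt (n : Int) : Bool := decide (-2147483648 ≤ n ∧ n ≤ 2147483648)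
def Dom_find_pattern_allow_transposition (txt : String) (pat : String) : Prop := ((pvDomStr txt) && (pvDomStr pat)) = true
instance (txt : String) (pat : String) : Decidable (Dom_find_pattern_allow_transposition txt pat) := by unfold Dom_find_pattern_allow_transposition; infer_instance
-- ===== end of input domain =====

-- B replaces A's Z-algorithm pipeline over '$'-joined strings by a direct per-window
-- prefix/suffix scanner (objective: simpler); equivalence is proved for texts without A's
-- sentinel character '$'.

-- ===== PORT A =====
-- A is ported over List Char with Nat indices: every index, length and z-value in A is
-- provably nonnegative, so Nat arithmetic agrees with Python's ints everywhere below.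

-- reverse_string(string) = string[::-1]
def pvRev (s : List Char) : List Char := s.reverse

-- string_match(string, r, l)
def pvStringMatch (s : List Char) (r l : Nat) : Bool :=
  decide (r < s.length) && decide (s.getD r '?' = s.getD (r - l) '?')

-- the inner `while string_match(combined_str, right, left): right += 1` loop;
-- returns the final value of `right`
def pvZwhile (s : List Char) (l r : Nat) : Nat :=
  if h : pvStringMatch s r l then pvZwhile s l (r + 1) else r
termination_by s.length - r
decreasing_by simp [pvStringMatch] at h; omega

-- one iteration of the `for i in range(1, len_combined)` loop of z_algorithm_list;
-- state is (z_lst, left, right).  `[None] * n` is `replicate n none`; the `.getD 0`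
-- on `z_lst[k]` is only reached where Python's value is an int (k ≥ 1 always, see proofs).
def pvZstep (s : List Char) (st : List (Option Nat) × Nat × Nat) (i : Nat) :
    List (Option Nat) × Nat × Nat :=
  let z := st.1; let left := st.2.1; let right := st.2.2
  if right < i then                     -- `if i > right`
    let r := pvZwhile s i i             -- left = i; right = i; while …: right += 1
    (z.set i (some (r - i)), i, r - 1)  -- z_lst[i] = right - left; right -= 1
  else
    let k := i - left
    if (z.getD k none).getD 0 < right - i + 1 then
      (z.set i (z.getD k none), left, right)   -- z_lst[i] = z_lst[k]
    else
      let r := pvZwhile s i right       -- left = i; while …: right += 1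
      (z.set i (some (r - i)), i, r - 1)

-- z_algorithm_list(combined_str)
def pvZalg (s : List Char) : List (Option Nat) :=
  ((List.range' 1 (s.length - 1)).foldl (pvZstep s) (List.replicate s.length none, 0, 0)).1

-- combine_text_pattern(txt, pat): '$'.join([pat, txt]) and '$'.join([pat[::-1], txt[::-1]])
def pvCombine (txt pat : List Char) : List Char × List Char :=
  (pat ++ '$' :: txt, pvRev pat ++ '$' :: pvRev txt)

def find_pattern_allow_transposition (txt : String) (pat : String) : List String :=
  let t := txt.toList
  let p := pat.toList
  if p.length = 0 ∨ t.length < p.length then []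
  else
    let og := (pvCombine t p).1
    let rv := (pvCombine t p).2
    let ogl := (pvZalg og).drop (p.length + 1)             -- z list of og, sliced [len(pat)+1:]
    let revl := ((pvZalg rv).drop (p.length + 1)).reverse  -- sliced, then .reverse()
    -- `calculate_lst.append(og_string_lst[i] + rev_string_lst[i + len(pat) - 1])`
    let calcl := (List.range (t.length - p.length + 1)).map
      (fun i => (ogl.getD i none).getD 0 + (revl.getD (i + p.length - 1) none).getD 0)
    (List.range calcl.length).foldl
      (fun res j =>
        let c := calcl.getD j 0
        if c = 2 * p.length then        -- `calculate_lst[j] / 2 == len(pat)`: exact for ints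
          res ++ [PySem.Int.toStr ((j : Int) + 1)]
        else if c + 2 = p.length then   -- `calculate_lst[j] + 2 == len(pat)`
          let index := (ogl.getD j none).getD 0
          let transposition := (p.drop index).take 2       -- pat[index : index + 2]
          let txt_string := og.drop (p.length + 1)         -- og_string[len(pat)+1:]
          if (txt_string.drop (j + index)).take 2 = pvRev transposition then
            res ++ [PySem.Int.toStr ((j : Int) + 1) ++ " " ++
                    PySem.Int.toStr ((j : Int) + (index : Int) + 1)]
          else res
        else res)
      []

-- ===== PORT B =====
-- helper lead(a, b): length of the common prefix of a and b (the zip/for loop of Source B)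
def pvLead : List Char → List Char → Nat
  | x :: a, y :: b => if x = y then pvLead a b + 1 else 0
  | _, _ => 0

def find_pattern_allow_transposition_alt (txt : String) (pat : String) : List String :=
  let t := txt.toList
  let p := pat.toList
  let m := p.length
  let n := t.length
  if m = 0 ∨ n < m then []
  else
    (List.range (n - m + 1)).foldl
      (fun res j =>
        let f := pvLead p (t.drop j)                       -- lead(pat, txt[j:])
        if f = m then res ++ [PySem.Int.toStr ((j : Int) + 1)]
        else
          let b := pvLead p.reverse ((t.drop j).take m).reverse  -- lead(pat[::-1], txt[j:j+m][::-1])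
          if (f : Int) + (b : Int) = (m : Int) - 2
              ∧ t.getD (j + f) '?' = p.getD (f + 1) '?'
              ∧ t.getD (j + f + 1) '?' = p.getD f '?' then
            res ++ [PySem.Int.toStr ((j : Int) + 1) ++ " " ++
                    PySem.Int.toStr ((j : Int) + (f : Int) + 1)]
          else res)
      []

-- ===== PRECONDITION & SPEC =====
-- Pre_ excludes inputs on which A still returns a value: texts containing A's sentinel
-- character '$', where A's Z-values overrun the '$' separator between pattern and text and
-- the output is an accident of the separator choice; B does plain windowed matching there.
def Pre_find_pattern_allow_transposition (txt : String) (pat : String) : Prop :=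
  '$' ∉ txt.toList
instance (txt : String) (pat : String) : Decidable (Pre_find_pattern_allow_transposition txt pat) := by
  unfold Pre_find_pattern_allow_transposition; infer_instance

def pvWitness_find_pattern_allow_transposition : String × String := ("abab", "ba")

def Spec_find_pattern_allow_transposition (txt : String) (pat : String) (out : List String) : Prop := out = find_pattern_allow_transposition_alt txt pat
instance (txt : String) (pat : String) (out : List String) : Decidable (Spec_find_pattern_allow_transposition txt pat out) := by unfold Spec_find_pattern_allow_transposition; infer_instance

-- ===== CLAIM (what is proved, stated in full; the proofs are below) =====
def Claim_equal_find_pattern_allow_transposition : Prop := ∀ (txt : String) (pat : String), Dom_find_pattern_allow_transposition txt pat → Pre_find_pattern_allow_transposition txt pat → Spec_find_pattern_allow_transposition txt pat (find_pattern_allow_transposition txt pat)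

-- ===== LEMMAS AND PROOFS =====

-- `Zf s i` = the true Z-value: the longest common prefix of s and s[i:]
def Zf (s : List Char) (i : Nat) : Nat := pvLead s (s.drop i)

theorem lead_le_left (a b : List Char) : pvLead a b ≤ a.length := by
  induction a generalizing b with
  | nil => simp [pvLead]
  | cons x a ih =>
    cases b with
    | nil => simp [pvLead]
    | cons y b =>
      simp only [pvLead, List.length_cons]
      split
      · have := ih b; omega
      · omega

theorem lead_le_right (a b : List Char) : pvLead a b ≤ b.length := by
  induction a generalizing b with
  | nil => simp [pvLead]
  | cons x a ih =>
    cases b with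
    | nil => simp [pvLead]
    | cons y b =>
      simp only [pvLead, List.length_cons]
      split
      · have := ih b; omega
      · omega

theorem lead_get (a b : List Char) (d : Char) (u : Nat) (h : u < pvLead a b) :
    a.getD u d = b.getD u d := by
  induction a generalizing b u with
  | nil => simp [pvLead] at h
  | cons x a ih =>
    cases b with
    | nil => simp [pvLead] at h
    | cons y b =>
      simp only [pvLead] at h
      split at h
      · cases u with
        | zero => simpa using ‹x = y›
        | succ u => simpa using ih b u (by omega)
      · omega

theorem lead_stop (a b : List Char) (d : Char) (h1 : pvLead a b < a.length)
    (h2 : pvLead a b < b.length) : a.getD (pvLead a b) d ≠ b.getD (pvLead a b) d := by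
  induction a generalizing b with
  | nil => simp [pvLead] at h1
  | cons x a ih =>
    cases b with
    | nil => simp [pvLead] at h2
    | cons y b =>
      simp only [pvLead, List.length_cons] at h1 h2 ⊢
      by_cases hxy : x = y
      · subst hxy
        rw [if_pos rfl] at h1 h2 ⊢
        simpa using ih b (by omega) (by omega)
      · rw [if_neg hxy] at h1 h2 ⊢
        simpa using hxy

theorem lead_ge (a b : List Char) (d : Char) (q : Nat) (h1 : q ≤ a.length) (h2 : q ≤ b.length)
    (h : ∀ u, u < q → a.getD u d = b.getD u d) : q ≤ pvLead a b := by
  induction a generalizing b q with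
  | nil => simp at h1; omega
  | cons x a ih =>
    cases b with
    | nil => simp at h2; omega
    | cons y b =>
      cases q with
      | zero => omega
      | succ q =>
        have hxy : x = y := by simpa using h 0 (by omega)
        simp only [pvLead, if_pos hxy]
        have := ih b q (by simpa using h1) (by simpa using h2)
          (fun u hu => by simpa using h (u+1) (by omega))
        omega

theorem lead_self (a : List Char) : pvLead a a = a.length := by
  induction a with
  | nil => simp [pvLead]
  | cons x a ih => simp [pvLead, ih]

theorem lead_eq_length_iff (a b : List Char) : pvLead a b = a.length ↔ b.take a.length = a := by
  induction a generalizing b with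
  | nil => simp [pvLead]
  | cons x a ih =>
    cases b with
    | nil =>
      simp [pvLead]
    | cons y b =>
      simp only [pvLead, List.length_cons, List.take_succ_cons, List.cons.injEq]
      split
      · next heq =>
        constructor
        · intro h; exact ⟨heq.symm, (ih b).1 (by omega)⟩
        · rintro ⟨_, h⟩
          have := (ih b).2 h
          omega
      · next hne =>
        constructor
        · omega
        · intro ⟨h, _⟩; exact absurd h.symm hne

theorem lead_take_right (a b : List Char) : pvLead a (b.take a.length) = pvLead a b := by
  induction a generalizing b with
  | nil => simp [pvLead]
  | cons x a ih =>
    cases b with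
    | nil => simp [pvLead]
    | cons y b =>
      simp only [List.length_cons, List.take_succ_cons, pvLead]
      rw [ih b]

theorem lead_append (a c b : List Char) :
    pvLead (a ++ c) b =
      if pvLead a b < a.length then pvLead a b else a.length + pvLead c (b.drop a.length) := by
  induction a generalizing b with
  | nil => simp [pvLead]
  | cons x a ih =>
    cases b with
    | nil => simp [pvLead]
    | cons y b =>
      simp only [List.cons_append, pvLead, List.length_cons, List.drop_succ_cons]
      split
      · next heq =>
        rw [ih b]
        split
        · next h1 => rw [if_pos (by omega)]
        · next h1 => rw [if_neg (by omega)]; omega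
      · simp

theorem getD_drop (l : List Char) (i u : Nat) (d : Char) :
    (l.drop i).getD u d = l.getD (i + u) d := by
  simp [List.getD_eq_getElem?_getD, List.getElem?_drop]

-- the while loop computes the true Z-value, given that the part [l, r) is already matched
theorem zwhile_correct (s : List Char) (l r : Nat) (hl : l ≤ s.length) (hlr : l ≤ r)
    (hpre : r - l ≤ Zf s l) : pvZwhile s l r = l + Zf s l := by
  have hZr : pvLead s (s.drop l) ≤ s.length - l := by
    have := lead_le_right s (s.drop l)
    simpa using this
  simp only [Zf] at hpre ⊢
  have key : ∀ n r, l ≤ r → r - l ≤ pvLead s (s.drop l) → l + pvLead s (s.drop l) - r = n →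
      pvZwhile s l r = l + pvLead s (s.drop l) := by
    intro n
    induction n with
    | zero =>
      intro r h1 h2 h3
      rw [pvZwhile, dif_neg]
      · omega
      · intro hm
        simp only [pvStringMatch, Bool.and_eq_true, decide_eq_true_eq] at hm
        obtain ⟨hrlen, heq⟩ := hm
        have hstop := lead_stop s (s.drop l) '?' (by omega)
          (by simp only [List.length_drop]; omega)
        apply hstop
        rw [getD_drop]
        rw [show pvLead s (s.drop l) = r - l from by omega]
        rw [show l + (r - l) = r from by omega]
        exact heq.symm
    | succ n ih =>
      intro r h1 h2 h3
      rw [pvZwhile, dif_pos]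
      · exact ih (r + 1) (by omega) (by omega) (by omega)
      · simp only [pvStringMatch, Bool.and_eq_true, decide_eq_true_eq]
        refine ⟨by omega, ?_⟩
        have hg := lead_get s (s.drop l) '?' (r - l) (by omega)
        rw [getD_drop, show l + (r - l) = r from by omega] at hg
        exact hg.symm
  exact key _ r hlr hpre rfl

-- invariant of the z_algorithm_list loop after the indices 1..t have been processed
def ZOK (s : List Char) (t : Nat) (st : List (Option Nat) × Nat × Nat) : Prop :=
  st.1.length = s.length ∧
  (∀ j, 1 ≤ j → j ≤ t → st.1.getD j none = some (Zf s j)) ∧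
  ((st.2.1 = 0 ∧ st.2.2 = 0) ∨
   (1 ≤ st.2.1 ∧ st.2.1 ≤ t ∧ st.2.2 + 1 = st.2.1 + Zf s st.2.1))


theorem Zf_le (s : List Char) (l : Nat) : Zf s l ≤ s.length - l := by
  have := lead_le_right s (s.drop l)
  simpa [Zf] using this

theorem box_point (s : List Char) (l r : Nat) (hbox : r + 1 = l + Zf s l) (u : Nat)
    (hu : l + u ≤ r) : s.getD (l + u) '?' = s.getD u '?' := by
  simp only [Zf] at hbox
  have := lead_get s (s.drop l) '?' u (by omega)
  rw [getD_drop] at this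
  exact this.symm

theorem z_lb (s : List Char) (l r i : Nat) (hbox : r + 1 = l + Zf s l)
    (hli : l < i) (hir : i ≤ r) (hk : r - i + 1 ≤ Zf s (i - l)) : r - i ≤ Zf s i := by
  have hr : r < s.length := by have := Zf_le s l; omega
  simp only [Zf] at hk ⊢
  apply lead_ge s (s.drop i) '?' (r - i) (by omega) (by simp only [List.length_drop]; omega)
  intro u hu
  have e1 : s.getD (i + u) '?' = s.getD ((i - l) + u) '?' := by
    have := box_point s l r hbox ((i - l) + u) (by omega)
    rw [show l + ((i - l) + u) = i + u from by omega] at this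
    exact this
  have e2 : s.getD ((i - l) + u) '?' = s.getD u '?' := by
    have := lead_get s (s.drop (i - l)) '?' u (by omega)
    rw [getD_drop] at this
    exact this.symm
  rw [getD_drop]
  exact (e1.trans e2).symm

theorem z_copy (s : List Char) (l r i : Nat) (hbox : r + 1 = l + Zf s l)
    (hli : l < i) (hir : i ≤ r) (hk : Zf s (i - l) < r - i + 1) : Zf s i = Zf s (i - l) := by
  have hr : r < s.length := by have := Zf_le s l; omega
  have hkd : Zf s (i - l) ≤ s.length - (i - l) := Zf_le s (i - l)
  have hge : Zf s (i - l) ≤ Zf s i := by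
    simp only [Zf] at hk ⊢
    apply lead_ge s (s.drop i) '?' _ (by omega) (by simp only [List.length_drop]; omega)
    intro u hu
    have e1 : s.getD (i + u) '?' = s.getD ((i - l) + u) '?' := by
      have := box_point s l r hbox ((i - l) + u) (by omega)
      rw [show l + ((i - l) + u) = i + u from by omega] at this
      exact this
    have e2 : s.getD ((i - l) + u) '?' = s.getD u '?' := by
      have := lead_get s (s.drop (i - l)) '?' u (by omega)
      rw [getD_drop] at this
      exact this.symm
    rw [getD_drop]
    exact (e1.trans e2).symm
  have hle : Zf s i ≤ Zf s (i - l) := by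
    by_contra hcon
    rw [not_le] at hcon
    set p := Zf s (i - l) with hp
    have hmain : s.getD p '?' = s.getD (i + p) '?' := by
      have := lead_get s (s.drop i) '?' p (by simp only [Zf] at hcon ⊢; omega)
      rw [getD_drop] at this
      exact this
    have hstop := lead_stop s (s.drop (i - l)) '?'
      (by simp only [Zf] at hp; rw [← hp]; omega)
      (by simp only [Zf] at hp; rw [← hp]; simp only [List.length_drop]; omega)
    apply hstop
    rw [getD_drop]
    have e1 : s.getD ((i - l) + p) '?' = s.getD (i + p) '?' := by
      have := box_point s l r hbox ((i - l) + p) (by omega)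
      rw [show l + ((i - l) + p) = i + p from by omega] at this
      exact this.symm
    simp only [Zf] at hp
    rw [← hp]
    exact hmain.trans e1.symm
  omega

theorem getD_set_self (l : List (Option Nat)) (i : Nat) (v : Option Nat) (h : i < l.length) :
    (l.set i v).getD i none = v := by
  simp [List.getD_eq_getElem?_getD, List.getElem?_set_self h]

theorem getD_set_ne (l : List (Option Nat)) (i j : Nat) (v : Option Nat) (h : i ≠ j) :
    (l.set i v).getD j none = l.getD j none := by
  simp [List.getD_eq_getElem?_getD, List.getElem?_set_ne h]

theorem zok_step (s : List Char) (t : Nat) (st : List (Option Nat) × Nat × Nat)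
    (hok : ZOK s t st) (hlt : t + 1 < s.length) : ZOK s (t + 1) (pvZstep s st (t + 1)) := by
  obtain ⟨hlen, hvals, hbox⟩ := hok
  simp only [pvZstep]
  by_cases hbr : st.2.2 < t + 1
  · rw [if_pos hbr]
    have hw := zwhile_correct s (t + 1) (t + 1) (by omega) (by omega) (by omega)
    rw [hw]
    unfold ZOK
    dsimp only
    refine ⟨by simpa using hlen, ?_, ?_⟩
    · intro j hj1 hj2
      by_cases hji : j = t + 1
      · subst hji
        rw [getD_set_self _ _ _ (by omega)]
        congr 1
        omega
      · rw [getD_set_ne _ _ _ _ (by omega)]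
        exact hvals j hj1 (by omega)
    · right
      have := Zf_le s (t + 1)
      exact ⟨by omega, by omega, by omega⟩
  · rw [if_neg hbr]
    have hir : t + 1 ≤ st.2.2 := by omega
    rcases hbox with ⟨hl0, hr0⟩ | ⟨hl1, hlt', hbx⟩
    · omega
    have hkval : st.1.getD (t + 1 - st.2.1) none = some (Zf s (t + 1 - st.2.1)) :=
      hvals _ (by omega) (by omega)
    rw [hkval]
    by_cases hcmp : (some (Zf s (t + 1 - st.2.1))).getD 0 < st.2.2 - (t + 1) + 1
    · rw [if_pos hcmp]
      simp only [Option.getD_some] at hcmp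
      unfold ZOK
      dsimp only
      refine ⟨by simpa using hlen, ?_, ?_⟩
      · intro j hj1 hj2
        by_cases hji : j = t + 1
        · subst hji
          rw [getD_set_self _ _ _ (by omega)]
          rw [z_copy s st.2.1 st.2.2 (t + 1) hbx (by omega) hir hcmp]
        · rw [getD_set_ne _ _ _ _ (by omega)]
          exact hvals j hj1 (by omega)
      · right
        exact ⟨hl1, by omega, hbx⟩
    · rw [if_neg hcmp]
      simp only [Option.getD_some] at hcmp
      have hlb := z_lb s st.2.1 st.2.2 (t + 1) hbx (by omega) hir (by omega)
      have hw := zwhile_correct s (t + 1) st.2.2 (by omega) (by omega) (by omega)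
      rw [hw]
      unfold ZOK
      dsimp only
      refine ⟨by simpa using hlen, ?_, ?_⟩
      · intro j hj1 hj2
        by_cases hji : j = t + 1
        · subst hji
          rw [getD_set_self _ _ _ (by omega)]
          congr 1
          omega
        · rw [getD_set_ne _ _ _ _ (by omega)]
          exact hvals j hj1 (by omega)
      · right
        have := Zf_le s (t + 1)
        exact ⟨by omega, by omega, by omega⟩

theorem zok_fold (s : List Char) (c : Nat) (hc : c ≤ s.length - 1) (hs : s ≠ []) :
    ZOK s c ((List.range' 1 c).foldl (pvZstep s) (List.replicate s.length none, 0, 0)) := by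
  induction c with
  | zero =>
    refine ⟨by simp, ?_, Or.inl ⟨rfl, rfl⟩⟩
    intro j hj1 hj2
    omega
  | succ c ih =>
    have hc' : c ≤ s.length - 1 := by omega
    have hok := ih hc'
    rw [List.range'_concat]
    rw [List.foldl_append]
    simp only [List.foldl_cons, List.foldl_nil]
    have hlen1 : 1 ≤ s.length := by
      cases s
      · exact absurd rfl hs
      · simp
    rw [show 1 + 1 * c = c + 1 from by omega]
    exact zok_step s c _ hok (by omega)

theorem zalg_correct (s : List Char) (i : Nat) (h1 : 1 ≤ i) (h2 : i < s.length) :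
    (pvZalg s).getD i none = some (Zf s i) := by
  have hs : s ≠ [] := by
    intro h
    subst h
    simp at h2
  have := zok_fold s (s.length - 1) (le_refl _) hs
  obtain ⟨hlen, hvals, _⟩ := this
  exact hvals i h1 (by omega)

-- dropping m+1+j characters off pat ++ '$' :: txt lands at txt[j:]
theorem drop_combined (p t : List Char) (j : Nat) :
    (p ++ '$' :: t).drop (p.length + 1 + j) = t.drop j := by
  rw [show p.length + 1 + j = p.length + (1 + j) from by omega,
      List.drop_length_add_append, show 1 + j = j + 1 from by omega]
  simp

-- for '$'-free txt the Z-value of the combined string is the per-window prefix-match count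
theorem lead_combined (p t b : List Char) (hb : ∀ c ∈ b, c ∈ t) (hd : '$' ∉ t) :
    pvLead (p ++ '$' :: t) b = pvLead p b := by
  rw [lead_append]
  split
  · rfl
  · next h =>
    have hle : pvLead p b = p.length := le_antisymm (lead_le_left p b) (by omega)
    rw [hle]
    cases hdrop : b.drop p.length with
    | nil => simp [pvLead]
    | cons c bs =>
      have hc : c ∈ t := by
        apply hb
        have : c ∈ b.drop p.length := by rw [hdrop]; exact List.mem_cons_self ..
        exact List.mem_of_mem_drop this
      have : ('$' : Char) ≠ c := fun hcc => hd (hcc ▸ hc)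
      simp [pvLead, this]


theorem getD_drop' {α : Type} (l : List α) (i u : Nat) (d : α) :
    (l.drop i).getD u d = l.getD (i + u) d := by
  simp [List.getD_eq_getElem?_getD, List.getElem?_drop]

theorem getD_reverse' {α : Type} (l : List α) (u : Nat) (d : α) (h : u < l.length) :
    l.reverse.getD u d = l.getD (l.length - 1 - u) d := by
  simp [List.getD_eq_getElem?_getD, List.getElem?_reverse h]

theorem getD_map_range' {α : Type} (g : Nat → α) (k j : Nat) (d : α) (h : j < k) :
    ((List.range k).map g).getD j d = g j := by
  simp [List.getD_eq_getElem?_getD, List.getElem?_range h]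

theorem zalg_length (s : List Char) : (pvZalg s).length = s.length := by
  by_cases hs : s = []
  · subst hs; simp [pvZalg]
  · exact (zok_fold s (s.length - 1) (le_refl _) hs).1

-- value of og_string_lst[j]: the per-window prefix-match count
theorem og_val (t p : List Char) (hd : '$' ∉ t) (hm : 1 ≤ p.length)
    (j : Nat) (hj : j < t.length) :
    ((pvZalg (p ++ '$' :: t)).drop (p.length + 1)).getD j none = some (pvLead p (t.drop j)) := by
  rw [getD_drop']
  rw [zalg_correct _ _ (by omega) (by simp only [List.length_append, List.length_cons]; omega)]
  unfold Zf
  rw [drop_combined]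
  rw [lead_combined p t _ (fun c hc => List.mem_of_mem_drop hc) hd]

-- value of rev_string_lst[j + len(pat) - 1] (after the .reverse()): the suffix-match count
theorem rev_val (t p : List Char) (hd : '$' ∉ t) (hm : 1 ≤ p.length)
    (j : Nat) (hj : j + p.length ≤ t.length) :
    (((pvZalg (p.reverse ++ '$' :: t.reverse)).drop (p.length + 1)).reverse).getD
        (j + p.length - 1) none
      = some (pvLead p.reverse ((t.drop j).take p.length).reverse) := by
  have hlen : ((pvZalg (p.reverse ++ '$' :: t.reverse)).drop (p.length + 1)).length = t.length := by
    rw [List.length_drop, zalg_length]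
    simp only [List.length_append, List.length_cons, List.length_reverse]
    omega
  rw [getD_reverse' _ _ _ (by omega), hlen]
  rw [show t.length - 1 - (j + p.length - 1) = t.length - (j + p.length) from by omega]
  rw [getD_drop']
  rw [zalg_correct _ _ (by omega)
    (by simp only [List.length_append, List.length_cons, List.length_reverse]; omega)]
  unfold Zf
  rw [show p.length + 1 + (t.length - (j + p.length)) =
        p.reverse.length + 1 + (t.length - (j + p.length)) from by simp]
  rw [drop_combined]
  rw [lead_combined p.reverse t.reverse _ (fun c hc => List.mem_of_mem_drop hc)
      (by simpa using hd)]
  congr 1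
  rw [← List.reverse_take]
  rw [← lead_take_right p.reverse ((t.take (j + p.length)).reverse),
      ← lead_take_right p.reverse (((t.drop j).take p.length).reverse)]
  congr 1
  rw [List.length_reverse]
  rw [List.take_reverse, List.take_reverse]
  congr 1
  rw [List.length_take, List.length_take]
  rw [show min (j + p.length) t.length - p.length = j from by omega,
      show min p.length (List.drop j t).length - p.length = 0 from by
        rw [List.length_drop]; omega]
  rw [List.drop_zero]
  rw [List.take_drop]

-- `calculate_lst[j] / 2 == len(pat)` fires exactly on the full-match windows
theorem full_iff (t p : List Char) (j : Nat) :
    pvLead p (t.drop j) + pvLead p.reverse ((t.drop j).take p.length).reverse = 2 * p.length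
      ↔ pvLead p (t.drop j) = p.length := by
  have h1 := lead_le_left p (t.drop j)
  have h2 := lead_le_left p.reverse ((t.drop j).take p.length).reverse
  rw [List.length_reverse] at h2
  constructor
  · intro h; omega
  · intro h
    have hw : (t.drop j).take p.length = p := (lead_eq_length_iff p (t.drop j)).1 h
    rw [hw]
    have hs : pvLead p.reverse p.reverse = p.length := by
      rw [lead_self, List.length_reverse]
    omega

-- the two-character transposition tests of A and B agree
theorem inner_iff (t p : List Char) (j F : Nat) (hF : F + 2 ≤ p.length)
    (hj : j + p.length ≤ t.length) :
    ((t.drop (j + F)).take 2 = ((p.drop F).take 2).reverse)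
      ↔ (t.getD (j + F) '?' = p.getD (F + 1) '?' ∧ t.getD (j + F + 1) '?' = p.getD F '?') := by
  have hjF1 : j + F + 1 < t.length := by omega
  have hjF : j + F < t.length := by omega
  have hF1 : F + 1 < p.length := by omega
  have hF0 : F < p.length := by omega
  have eL : (t.drop (j + F)).take 2 = [t[j + F], t[j + F + 1]] := by
    rw [List.drop_eq_getElem_cons hjF, List.drop_eq_getElem_cons hjF1]
    rfl
  have eR : (p.drop F).take 2 = [p[F], p[F + 1]] := by
    rw [List.drop_eq_getElem_cons hF0, List.drop_eq_getElem_cons hF1]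
    rfl
  have g1 : t.getD (j + F) '?' = t[j + F] := List.getD_eq_getElem t '?' hjF
  have g2 : t.getD (j + F + 1) '?' = t[j + F + 1] := List.getD_eq_getElem t '?' hjF1
  have g3 : p.getD (F + 1) '?' = p[F + 1] := List.getD_eq_getElem p '?' hF1
  have g4 : p.getD F '?' = p[F] := List.getD_eq_getElem p '?' hF0
  rw [eL, eR, g1, g2, g3, g4]
  simp

-- ===== VERDICT (by name: the statement is the Claim_ definition above) =====
theorem find_pattern_allow_transposition_spec : Claim_equal_find_pattern_allow_transposition := by
  intro txt pat hdom hpre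
  unfold Spec_find_pattern_allow_transposition
  unfold find_pattern_allow_transposition find_pattern_allow_transposition_alt
  unfold Pre_find_pattern_allow_transposition at hpre
  dsimp only [pvCombine, pvRev]
  by_cases hguard : pat.toList.length = 0 ∨ txt.toList.length < pat.toList.length
  · rw [if_pos hguard, if_pos hguard]
  · rw [if_neg hguard, if_neg hguard]
    set t := txt.toList with ht
    set p := pat.toList with hp
    have hm : 1 ≤ p.length := by omega
    have hmn : p.length ≤ t.length := by omega
    simp only [List.length_map, List.length_range]
    apply PySem.List.foldl_congr_mem
    intro acc j hj
    have hjlt : j < t.length - p.length + 1 := List.mem_range.1 hj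
    have hjm : j + p.length ≤ t.length := by omega
    rw [getD_map_range' _ _ _ _ hjlt]
    rw [og_val t p hpre hm j (by omega)]
    rw [rev_val t p hpre hm j hjm]
    simp only [Option.getD_some]
    by_cases hFm : pvLead p (t.drop j) = p.length
    · rw [if_pos ((full_iff t p j).2 hFm), if_pos hFm]
    · rw [if_neg (fun h => hFm ((full_iff t p j).1 h)), if_neg hFm]
      by_cases hc2 :
          pvLead p (t.drop j) + pvLead p.reverse ((t.drop j).take p.length).reverse + 2 = p.length
      · rw [if_pos hc2]
        have hInt : (pvLead p (t.drop j) : Int)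
            + (pvLead p.reverse ((t.drop j).take p.length).reverse : Int) = (p.length : Int) - 2 := by
          omega
        have htxtstr : (p ++ '$' :: t).drop (p.length + 1) = t := by
          have := drop_combined p t 0
          simp only [Nat.add_zero, List.drop_zero] at this
          exact this
        rw [htxtstr]
        have hchar := inner_iff t p j (pvLead p (t.drop j)) (by omega) hjm
        by_cases hcc : t.getD (j + pvLead p (t.drop j)) '?'
              = p.getD (pvLead p (t.drop j) + 1) '?'
            ∧ t.getD (j + pvLead p (t.drop j) + 1) '?' = p.getD (pvLead p (t.drop j)) '?'
        · rw [if_pos (hchar.2 hcc), if_pos ⟨hInt, hcc.1, hcc.2⟩]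
        · rw [if_neg (fun h => hcc (hchar.1 h)),
              if_neg (fun h => hcc ⟨h.2.1, h.2.2⟩)]
      · rw [if_neg hc2]
        rw [if_neg (fun h => hc2 (by
          have := h.1
          omega))]
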